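-- pv_equiv track=rewrite | github.com/Oas7pOo/AiProofAgent | old/tab_proof2.py | _unique_ext_from_filetypes
-- ===== SOURCE A (Python) =====
-- def _unique_ext_from_filetypes(filetypes) -> str:
--     exts = set()
--     for ft in filetypes or []:
--         if not ft or len(ft) < 2:
--             continue
--         pat = str(ft[1])
--         for token in pat.split():
--             token = token.strip()
--             if token.startswith("*.") and " " not in token:
--                 # "*.json" -> ".json"
--                 exts.add(token[1:])
--     return list(exts)[0] if len(exts) == 1 else ""
-- ===== SOURCE B (Python) =====
-- def _unique_ext_from_filetypes(filetypes) -> str: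
--     candidate = None
--     conflict = False
--     for ft in filetypes or []:
--         if conflict:
--             break
--         if not ft or len(ft) < 2:
--             continue
--         for token in str(ft[1]).split():
--             if token.startswith("*."):
--                 ext = token[1:]
--                 if candidate is None:
--                     candidate = ext
--                 elif ext != candidate:
--                     conflict = True
--                     break
--     return candidate if candidate is not None and not conflict else ""
-- ===== Notes on version B (the rewrite author's own statement) =====
-- stated objective: simpler
-- what changed: Replaces the accumulated set of all extensions (plus the redundant strip and space-membership checks on whitespace-split tokens) with a single-candidate/conflict-flag scan that breaks early once two distinct extensions are seen.
import Mathlib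
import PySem

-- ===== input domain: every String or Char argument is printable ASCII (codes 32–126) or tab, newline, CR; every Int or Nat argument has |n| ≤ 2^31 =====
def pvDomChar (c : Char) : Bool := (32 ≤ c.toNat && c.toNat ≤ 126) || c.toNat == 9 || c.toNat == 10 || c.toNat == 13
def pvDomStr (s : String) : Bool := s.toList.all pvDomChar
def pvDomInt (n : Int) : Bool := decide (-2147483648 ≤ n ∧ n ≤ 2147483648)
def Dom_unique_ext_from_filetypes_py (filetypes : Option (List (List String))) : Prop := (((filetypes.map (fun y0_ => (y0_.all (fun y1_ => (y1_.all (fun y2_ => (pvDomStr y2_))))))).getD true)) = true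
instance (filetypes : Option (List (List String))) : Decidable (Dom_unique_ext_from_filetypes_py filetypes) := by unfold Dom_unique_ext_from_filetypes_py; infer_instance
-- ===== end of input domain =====

-- B replaces A's set of all extensions by a single candidate plus a conflict flag
-- with an early break (objective: simpler); return values agree on every input.

-- ===== PORT A =====
-- inner loop body of A: strip the token, test startswith("*.") and ' ' not in token, add token[1:]
def pvA_tokenStep (exts : PySem.Set String) (token : String) : PySem.Set String :=
  let token := PySem.Str.strip token
  if PySem.Str.startswith token "*." && !(PySem.Str.isIn " " token) then
    PySem.Set.add exts (PySem.Str.slice token (some 1) none)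
  else exts

-- outer loop body of A
def pvA_ftStep (exts : PySem.Set String) (ft : List String) : PySem.Set String :=
  if ft.isEmpty || decide (ft.length < 2) then exts
  else
    -- pat = str(ft[1]); the index is in range here (ft.length ≥ 2), so getD never fires
    (PySem.Str.split₀ ((PySem.List.pyGet? ft 1).getD "")).foldl pvA_tokenStep exts

def unique_ext_from_filetypes_py (filetypes : Option (List (List String))) : String :=
  let exts : PySem.Set String := (filetypes.getD []).foldl pvA_ftStep PySem.Set.empty
  -- list(exts)[0] if len(exts) == 1 else "" — index 0 is in range under the guard, so getD never fires
  if PySem.Set.len exts = 1 then (PySem.List.pyGet? exts 0).getD "" else ""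

-- ===== PORT B =====
-- inner loop of B: scan tokens, keeping the candidate; on a second distinct ext set the conflict flag and break
def pvScanTokens : Option String → List String → Option String × Bool
  | cand, [] => (cand, false)
  | cand, token :: rest =>
    if PySem.Str.startswith token "*." then
      let ext := PySem.Str.slice token (some 1) none
      match cand with
      | none => pvScanTokens (some ext) rest
      | some c => if ext == c then pvScanTokens (some c) rest else (some c, true)
    else pvScanTokens cand rest

-- outer loop of B: break as soon as the conflict flag is set
def pvScanFiletypes : Option String → List (List String) → Option String × Bool
  | cand, [] => (cand, false)
  | cand, ft :: rest =>
    if ft.isEmpty || decide (ft.length < 2) then pvScanFiletypes cand rest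
    else
      match pvScanTokens cand (PySem.Str.split₀ ((PySem.List.pyGet? ft 1).getD "")) with
      | (cand', true) => (cand', true)
      | (cand', false) => pvScanFiletypes cand' rest

def unique_ext_from_filetypes_py_alt (filetypes : Option (List (List String))) : String :=
  match pvScanFiletypes none (filetypes.getD []) with
  | (some c, false) => c
  | _ => ""

-- ===== PRECONDITION & SPEC =====
def Spec_unique_ext_from_filetypes_py (filetypes : Option (List (List String))) (out : String) : Prop := out = unique_ext_from_filetypes_py_alt filetypes
instance (filetypes : Option (List (List String))) (out : String) : Decidable (Spec_unique_ext_from_filetypes_py filetypes out) := by unfold Spec_unique_ext_from_filetypes_py; infer_instance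

-- ===== CLAIM (what is proved, stated in full; the proofs are below) =====
def Claim_equal_unique_ext_from_filetypes_py : Prop := ∀ (filetypes : Option (List (List String))), Dom_unique_ext_from_filetypes_py filetypes → Spec_unique_ext_from_filetypes_py filetypes (unique_ext_from_filetypes_py filetypes)

-- ===== LEMMAS AND PROOFS =====

-- every piece of split₀ contains no whitespace character
theorem pvSplit₀_go_nospace : ∀ (s cur : List Char) (acc : List (List Char)),
    (∀ c ∈ cur, PySem.Chars.isspace c = false) →
    (∀ p ∈ acc, ∀ c ∈ p, PySem.Chars.isspace c = false) →
    ∀ p ∈ PySem.Chars.split₀.go s cur acc, ∀ c ∈ p, PySem.Chars.isspace c = false := by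
  intro s
  induction s with
  | nil =>
    intro cur acc hcur hacc p hp
    simp only [PySem.Chars.split₀.go] at hp
    split at hp
    · exact fun c hc => hacc _ (List.mem_reverse.mp hp) c hc
    · rcases List.mem_cons.mp (List.mem_reverse.mp hp) with h | h
      · exact fun c hc => hcur c (List.mem_reverse.mp (h ▸ hc))
      · exact fun c hc => hacc _ h c hc
  | cons a s ih =>
    intro cur acc hcur hacc p hp
    simp only [PySem.Chars.split₀.go] at hp
    by_cases ha : PySem.Chars.isspace a = true
    · rw [if_pos ha] at hp
      split at hp
      · exact ih [] acc (by simp) hacc p hp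
      · refine ih [] (cur.reverse :: acc) (by simp) ?_ p hp
        intro q hq c hc
        rcases List.mem_cons.mp hq with h | h
        · exact hcur c (List.mem_reverse.mp (h ▸ hc))
        · exact hacc _ h c hc
    · rw [if_neg ha] at hp
      refine ih (a :: cur) acc ?_ hacc p hp
      intro c hc
      rcases List.mem_cons.mp hc with h | h
      · subst h; simpa using ha
      · exact hcur c h

theorem pvToken_nospace (pat t : String) (ht : t ∈ PySem.Str.split₀ pat) :
    ∀ c ∈ t.toList, PySem.Chars.isspace c = false := by
  have h : t.toList ∈ PySem.Chars.split₀ pat.toList := by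
    rw [← PySem.Str.split₀_map_toList]
    exact List.mem_map_of_mem ht
  exact pvSplit₀_go_nospace pat.toList [] [] (by simp) (by simp) t.toList h

theorem pvDropWhile_nospace (l : List Char) (h : ∀ c ∈ l, PySem.Chars.isspace c = false) :
    l.dropWhile PySem.Chars.isspace = l := by
  cases l with
  | nil => rfl
  | cons a l => simp [h a (by simp)]

theorem pvStrip_nospace (t : String) (h : ∀ c ∈ t.toList, PySem.Chars.isspace c = false) :
    PySem.Str.strip t = t := by
  unfold PySem.Str.strip PySem.Chars.strip PySem.Chars.lstrip PySem.Chars.rstrip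
  rw [pvDropWhile_nospace _ h, pvDropWhile_nospace _ (by simpa using h)]
  simp

theorem pvIsIn_space_false (t : String) (h : ∀ c ∈ t.toList, PySem.Chars.isspace c = false) :
    PySem.Str.isIn " " t = false := by
  rw [← Bool.not_eq_true, PySem.Str.isIn_iff_infix]
  intro hinf
  have hmem : ' ' ∈ t.toList := hinf.mem (by decide)
  have := h ' ' hmem
  simp [PySem.Chars.isspace] at this

-- A's token step, once the strip and the space check have been discharged
def pvStepA (s : PySem.Set String) (token : String) : PySem.Set String :=
  if PySem.Str.startswith token "*." then
    PySem.Set.add s (PySem.Str.slice token (some 1) none)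
  else s

theorem pvTokenStep_eq (pat : String) (s : PySem.Set String) :
    (PySem.Str.split₀ pat).foldl pvA_tokenStep s = (PySem.Str.split₀ pat).foldl pvStepA s := by
  refine PySem.List.foldl_congr_mem _ _ _ _ (fun acc t ht => ?_)
  have hns := pvToken_nospace pat t ht
  unfold pvA_tokenStep pvStepA
  simp only [pvStrip_nospace t hns, pvIsIn_space_false t hns, Bool.not_false, Bool.and_true]

-- the relation between A's set-so-far and B's (candidate, conflict) state
def pvRel (s : List String) (st : Option String × Bool) : Prop :=
  if st.2 then 2 ≤ s.length else s = st.1.toList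

theorem pvStepA_len (s : PySem.Set String) (t : String) : s.length ≤ (pvStepA s t).length := by
  unfold pvStepA
  split
  · unfold PySem.Set.add; split <;> simp
  · exact le_rfl

theorem pvFoldA_len (ts : List String) (s : PySem.Set String) :
    s.length ≤ (ts.foldl pvStepA s).length := by
  induction ts generalizing s with
  | nil => exact le_rfl
  | cons t ts ih => exact le_trans (pvStepA_len s t) (ih _)

theorem pvAddEmpty (x : String) : PySem.Set.add ([] : PySem.Set String) x = [x] := by
  simp [PySem.Set.add, PySem.Set.contains]

theorem pvScanTokens_rel : ∀ (ts : List String) (cand : Option String),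
    pvRel (ts.foldl pvStepA cand.toList) (pvScanTokens cand ts) := by
  intro ts
  induction ts with
  | nil => intro cand; simp [pvRel, pvScanTokens]
  | cons t ts ih =>
    intro cand
    rw [List.foldl_cons]
    by_cases hstart : PySem.Str.startswith t "*." = true
    · cases cand with
      | none =>
        have hstep : pvStepA (none : Option String).toList t = [PySem.Str.slice t (some 1) none] := by
          unfold pvStepA; rw [if_pos hstart]; exact pvAddEmpty _
        rw [hstep]
        simp only [pvScanTokens, if_pos hstart]
        exact ih (some (PySem.Str.slice t (some 1) none))
      | some c =>
        by_cases hext : (PySem.Str.slice t (some 1) none == c) = true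
        · have hc : PySem.Str.slice t (some 1) none = c := by simpa using hext
          have hstep : pvStepA (some c).toList t = [c] := by
            unfold pvStepA; rw [if_pos hstart, hc]
            exact PySem.Set.add_of_mem (by simp)
          rw [hstep]
          simp only [pvScanTokens, if_pos hstart, if_pos hext]
          exact ih (some c)
        · have hne : PySem.Str.slice t (some 1) none ∉ ([c] : List String) := by
            simpa using fun h => hext (by simp [h])
          have hstep : pvStepA (some c).toList t = [c, PySem.Str.slice t (some 1) none] := by
            unfold pvStepA; rw [if_pos hstart]
            simpa using PySem.Set.add_of_not_mem hne
          rw [hstep]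
          simp only [pvScanTokens, if_pos hstart, if_neg hext]
          show pvRel _ (some c, true)
          simp only [pvRel]
          simp only [if_pos]
          calc (2 : ℕ) = ([c, PySem.Str.slice t (some 1) none] : List String).length := by simp
            _ ≤ _ := pvFoldA_len ts _
    · have hstep : pvStepA cand.toList t = cand.toList := by
        unfold pvStepA; rw [if_neg hstart]
      rw [hstep]
      simp only [pvScanTokens, if_neg hstart]
      exact ih cand

theorem pvFtStep_len (s : PySem.Set String) (ft : List String) :
    s.length ≤ (pvA_ftStep s ft).length := by
  unfold pvA_ftStep
  split
  · exact le_rfl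
  · rw [pvTokenStep_eq]; exact pvFoldA_len _ _

theorem pvFoldFt_len (fts : List (List String)) (s : PySem.Set String) :
    s.length ≤ (fts.foldl pvA_ftStep s).length := by
  induction fts generalizing s with
  | nil => exact le_rfl
  | cons ft fts ih => exact le_trans (pvFtStep_len s ft) (ih _)

theorem pvScanFiletypes_rel : ∀ (fts : List (List String)) (cand : Option String),
    pvRel (fts.foldl pvA_ftStep cand.toList) (pvScanFiletypes cand fts) := by
  intro fts
  induction fts with
  | nil => intro cand; simp [pvRel, pvScanFiletypes]
  | cons ft fts ih =>
    intro cand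
    rw [List.foldl_cons]
    simp only [pvScanFiletypes]
    by_cases hg : (ft.isEmpty || decide (ft.length < 2)) = true
    · rw [if_pos hg]
      have hstep : pvA_ftStep cand.toList ft = cand.toList := by unfold pvA_ftStep; rw [if_pos hg]
      rw [hstep]; exact ih cand
    · rw [if_neg hg]
      have hA : pvA_ftStep cand.toList ft =
          (PySem.Str.split₀ ((PySem.List.pyGet? ft 1).getD "")).foldl pvStepA cand.toList := by
        unfold pvA_ftStep; rw [if_neg hg, pvTokenStep_eq]
      have hrel := pvScanTokens_rel (PySem.Str.split₀ ((PySem.List.pyGet? ft 1).getD "")) cand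
      rcases hst : pvScanTokens cand (PySem.Str.split₀ ((PySem.List.pyGet? ft 1).getD "")) with ⟨cand', conflict'⟩
      rw [hst] at hrel
      cases conflict' with
      | true =>
        rw [hA]
        simp only [pvRel] at hrel ⊢
        simp only [if_pos] at hrel ⊢
        exact le_trans hrel (pvFoldFt_len fts _)
      | false =>
        simp only [pvRel, if_neg (by simp : ¬ (false = true))] at hrel
        rw [hA, hrel]
        exact ih cand'

-- ===== VERDICT (by name: the statement is the Claim_ definition above) =====
theorem unique_ext_from_filetypes_py_spec : Claim_equal_unique_ext_from_filetypes_py := by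
  intro filetypes _
  unfold Spec_unique_ext_from_filetypes_py unique_ext_from_filetypes_py unique_ext_from_filetypes_py_alt
  have h := pvScanFiletypes_rel (filetypes.getD []) none
  rcases hst : pvScanFiletypes none (filetypes.getD []) with ⟨cand, conflict⟩
  rw [hst] at h
  have hempty : (PySem.Set.empty : PySem.Set String) = ((none : Option String).toList : List String) := rfl
  rw [hempty]
  cases conflict with
  | true =>
    have h2 : 2 ≤ (List.foldl pvA_ftStep ((none : Option String).toList) (filetypes.getD [])).length := by
      simpa [pvRel] using h
    have hne : PySem.Set.len ((filetypes.getD []).foldl pvA_ftStep ((none : Option String).toList)) ≠ 1 := by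
      simp only [PySem.Set.len]
      omega
    rw [if_neg hne]
    cases cand <;> rfl
  | false =>
    have h' : List.foldl pvA_ftStep ([] : List String) (filetypes.getD []) = cand.toList := by
      simpa [pvRel] using h
    cases cand with
    | none =>
      rw [if_neg (by simp [PySem.Set.len, h'])]
    | some c =>
      rw [if_pos (by simp [PySem.Set.len, h'])]
      show (PySem.List.pyGet? (List.foldl pvA_ftStep ([] : List String) (filetypes.getD [])) 0).getD "" = _
      rw [h']
      rfl
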